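-- pv_equiv track=rewrite | github.com/Matthieumoto/Sujet-3-Entrainement-NSI-Terminal-Arbre | sujet_3_Matthieu_Kremer_TG7.py | meilleur_adversaire
-- ===== SOURCE A (Python) =====
-- def meilleur_adversaire(dic):
--     adversaire = []
--
--     # Calcul des résultats et stockage dans la liste adversaire
--     for i in dic.keys():
--         combat, victoire = dic[i][1], dic[i][2]
--         resultat = combat - victoire
--         adversaire.append(resultat)
--
--     # Recherche du maximum dans la liste
--     max_resultat = max(adversaire)
--
--     # Recherche des adversaires ayant le résultat maximum
--     meilleurs_adversaires = [cle for cle, valeur in dic.items() if valeur[1] - valeur[2] == max_resultat]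
--
--     return max_resultat, meilleurs_adversaires
-- ===== SOURCE B (Python) =====
-- def meilleur_adversaire(dic):
--     best = None
--     keys = []
--     for cle, valeur in dic.items():
--         r = valeur[1] - valeur[2]
--         if best is None or r > best:
--             best = r
--             keys = [cle]
--         elif r == best:
--             keys.append(cle)
--     if best is None:
--         raise ValueError("max() arg is an empty sequence")
--     return best, keys
-- ===== Notes on version B (the rewrite author's own statement) =====
-- stated objective: alternative
-- what changed: Single pass maintaining the running best score and the list of keys achieving it, instead of A's three passes (build a score list, take its max, then re-scan the dict filtering for the max).
-- outside the precondition, e.g. on meilleur_adversaire({}): A raises ValueError, B raises ValueError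
import Mathlib
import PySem

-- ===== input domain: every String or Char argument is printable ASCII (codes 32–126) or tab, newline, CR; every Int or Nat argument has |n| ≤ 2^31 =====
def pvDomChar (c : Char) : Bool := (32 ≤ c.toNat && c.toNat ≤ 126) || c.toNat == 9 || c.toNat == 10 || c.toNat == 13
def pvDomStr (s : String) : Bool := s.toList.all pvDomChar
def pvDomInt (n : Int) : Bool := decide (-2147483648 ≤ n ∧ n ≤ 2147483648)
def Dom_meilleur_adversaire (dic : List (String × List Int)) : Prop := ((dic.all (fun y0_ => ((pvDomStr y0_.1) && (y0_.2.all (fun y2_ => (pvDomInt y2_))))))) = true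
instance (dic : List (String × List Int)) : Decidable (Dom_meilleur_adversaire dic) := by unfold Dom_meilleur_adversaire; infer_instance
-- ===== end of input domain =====

-- B replaces A's three passes (score list, max(), filtering re-scan) by one pass keeping
-- the running best score and the keys achieving it; same cost class, different decomposition.

-- ===== PORT A =====
-- dic[i]: Python dict lookup = first match in the association list
def pvLookupA (dic : List (String × List Int)) (i : String) : List Int :=
  ((dic.find? (fun kv => kv.1 == i)).map (fun kv => kv.2)).getD []

def meilleur_adversaire (dic : List (String × List Int)) : Int × List String :=
  -- for i in dic.keys(): adversaire.append(dic[i][1] - dic[i][2])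
  let adversaire : List Int :=
    (dic.map (fun kv => kv.1)).foldl
      (fun acc i =>
        let v := pvLookupA dic i
        let combat := PySem.List.pyGetD v 1 0
        let victoire := PySem.List.pyGetD v 2 0
        acc ++ [combat - victoire]) []
  -- max_resultat = max(adversaire)
  let max_resultat : Int := (PySem.List.max? adversaire (fun x => x)).getD 0
  -- [cle for cle, valeur in dic.items() if valeur[1] - valeur[2] == max_resultat]
  let meilleurs_adversaires : List String :=
    (dic.filter (fun kv =>
      PySem.List.pyGetD kv.2 1 0 - PySem.List.pyGetD kv.2 2 0 == max_resultat)).map (fun kv => kv.1)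
  (max_resultat, meilleurs_adversaires)

-- ===== PORT B =====
def pvStepB (st : Option Int × List String) (kv : String × List Int) : Option Int × List String :=
  let r := PySem.List.pyGetD kv.2 1 0 - PySem.List.pyGetD kv.2 2 0
  match st.1 with
  | none => (some r, [kv.1])
  | some b => if b < r then (some r, [kv.1])
              else if r == b then (some b, st.2 ++ [kv.1])
              else st

def meilleur_adversaire_alt (dic : List (String × List Int)) : Int × List String :=
  match dic.foldl pvStepB (none, []) with
  | (some b, ks) => (b, ks)
  | (none, _) => (0, [])   -- Python B raises ValueError here (empty dict); outside Pre_

-- ===== PRECONDITION & SPEC =====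
-- Pre_ excludes exactly the inputs where A raises: the empty dict (max([]) → ValueError) and
-- values shorter than 3 (IndexError on value[1]/value[2]); keys are Nodup because the input is
-- a Python dict, whose keys are unique by construction (no input A accepts is excluded by it).
def Pre_meilleur_adversaire (dic : List (String × List Int)) : Prop :=
  dic ≠ [] ∧ (dic.map (fun kv => kv.1)).Nodup ∧ ∀ kv ∈ dic, 3 ≤ kv.2.length
instance (dic : List (String × List Int)) : Decidable (Pre_meilleur_adversaire dic) := by
  unfold Pre_meilleur_adversaire; infer_instance

def pvWitness_meilleur_adversaire : (List (String × List Int)) :=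
  [("a", [1, 5, 2]), ("b", [0, 4, 1])]

def Spec_meilleur_adversaire (dic : List (String × List Int)) (out : Int × List String) : Prop := out = meilleur_adversaire_alt dic
instance (dic : List (String × List Int)) (out : Int × List String) : Decidable (Spec_meilleur_adversaire dic out) := by unfold Spec_meilleur_adversaire; infer_instance

-- ===== CLAIM (what is proved, stated in full; the proofs are below) =====
def Claim_equal_meilleur_adversaire : Prop := ∀ (dic : List (String × List Int)), Dom_meilleur_adversaire dic → Pre_meilleur_adversaire dic → Spec_meilleur_adversaire dic (meilleur_adversaire dic)

-- ===== LEMMAS AND PROOFS =====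

-- the per-entry score
def pvScore (kv : String × List Int) : Int :=
  PySem.List.pyGetD kv.2 1 0 - PySem.List.pyGetD kv.2 2 0

-- with Nodup keys, dic[kv.1] is kv.2 for each entry kv of dic
theorem pvLookup_self (dic : List (String × List Int))
    (hnd : (dic.map (fun kv => kv.1)).Nodup) :
    ∀ kv ∈ dic, pvLookupA dic kv.1 = kv.2 := by
  induction dic with
  | nil => intro kv h; cases h
  | cons hd tl ih =>
    simp only [List.map_cons, List.nodup_cons] at hnd
    intro kv hkv
    cases hkv with
    | head => simp [pvLookupA]
    | tail _ htl =>
      have hne : ¬ (hd.1 == kv.1) = true := by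
        simp only [beq_iff_eq]
        intro he
        exact hnd.1 (he ▸ List.mem_map_of_mem htl)
      have := ih hnd.2 kv htl
      simpa [pvLookupA, List.find?, hne] using this

-- A's score list is dic.map pvScore
theorem pvAdversaire_eq (dic : List (String × List Int))
    (hnd : (dic.map (fun kv => kv.1)).Nodup) :
    (dic.map (fun kv => kv.1)).foldl
      (fun acc i =>
        let v := pvLookupA dic i
        acc ++ [PySem.List.pyGetD v 1 0 - PySem.List.pyGetD v 2 0]) []
    = dic.map pvScore := by
  rw [PySem.List.foldl_append_singleton_eq_map]
  simp only [List.nil_append, List.map_map]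
  apply List.map_congr_left
  intro kv hkv
  simp only [Function.comp]
  rw [pvLookup_self dic hnd kv hkv]
  rfl

-- pvStepB seen through pvScore
theorem pvStepB_some (b : Int) (ks : List String) (kv : String × List Int) :
    pvStepB (some b, ks) kv =
      if b < pvScore kv then (some (pvScore kv), [kv.1])
      else if pvScore kv = b then (some b, ks ++ [kv.1])
      else (some b, ks) := by
  simp only [pvStepB, pvScore, beq_iff_eq]
  rfl

-- B's fold from a some-state: running max plus the keys achieving it
theorem pvFoldB_some (l : List (String × List Int)) (b : Int) (ks : List String) :
    l.foldl pvStepB (some b, ks)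
      = (some ((l.map pvScore).foldl max b),
         (if b = (l.map pvScore).foldl max b then ks else [])
           ++ (l.filter (fun kv => pvScore kv == (l.map pvScore).foldl max b)).map
                (fun kv => kv.1)) := by
  induction l generalizing b ks with
  | nil => simp
  | cons hd tl ih =>
    have hM : ((hd :: tl).map pvScore).foldl max b = (tl.map pvScore).foldl max (max b (pvScore hd)) := by
      simp
    rw [List.foldl_cons, pvStepB_some]
    by_cases hlt : b < pvScore hd
    · have hmax : max b (pvScore hd) = pvScore hd := by omega
      rw [if_pos hlt, ih]
      have hble : b ≠ (tl.map pvScore).foldl max (pvScore hd) := by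
        have := PySem.List.le_foldl_max (tl.map pvScore) (pvScore hd)
        omega
      simp only [hM, hmax, List.filter_cons, if_neg hble]
      by_cases he : pvScore hd = (tl.map pvScore).foldl max (pvScore hd)
      · rw [if_pos he, if_pos (by exact beq_iff_eq.mpr he)]
        simp
      · rw [if_neg he, if_neg (by simp only [beq_iff_eq]; exact he)]
    · rw [if_neg hlt]
      by_cases heq : pvScore hd = b
      · have hmax : max b (pvScore hd) = b := by omega
        rw [if_pos heq, ih]
        simp only [hM, hmax, List.filter_cons]
        by_cases he : b = (tl.map pvScore).foldl max b
        · rw [if_pos he, if_pos he, if_pos (by rw [beq_iff_eq, heq]; exact he)]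
          simp
        · have hne : ¬ (pvScore hd == (tl.map pvScore).foldl max b) = true := by
            simp only [beq_iff_eq, heq]; exact he
          simp [if_neg he, hne]
      · have hgt : pvScore hd < b := by omega
        have hmax : max b (pvScore hd) = b := by omega
        rw [if_neg heq, ih]
        have hble : pvScore hd ≠ (tl.map pvScore).foldl max b := by
          have := PySem.List.le_foldl_max (tl.map pvScore) b
          omega
        simp only [hM, hmax, List.filter_cons]
        simp [beq_iff_eq, hble]

-- ===== VERDICT (by name: the statement is the Claim_ definition above) =====
theorem meilleur_adversaire_spec : Claim_equal_meilleur_adversaire := by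
  intro dic _ hpre
  obtain ⟨hne, hnd, _⟩ := hpre
  unfold Spec_meilleur_adversaire
  cases dic with
  | nil => exact absurd rfl hne
  | cons hd tl =>
    show meilleur_adversaire (hd :: tl) = meilleur_adversaire_alt (hd :: tl)
    unfold meilleur_adversaire meilleur_adversaire_alt
    rw [pvAdversaire_eq (hd :: tl) hnd]
    rw [List.foldl_cons]
    have hstep0 : pvStepB (none, []) hd = (some (pvScore hd), [hd.1]) := rfl
    rw [hstep0, pvFoldB_some]
    have hmax : PySem.List.max? ((hd :: tl).map pvScore) (fun x => x)
        = some ((tl.map pvScore).foldl max (pvScore hd)) := by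
      rw [List.map_cons]
      exact PySem.List.max?_id_cons _ _
    simp only [hmax, Option.getD_some]
    set M := (tl.map pvScore).foldl max (pvScore hd) with hMdef
    simp only [List.filter_cons]
    by_cases he : pvScore hd = M
    · have he' : (PySem.List.pyGetD hd.2 1 0 - PySem.List.pyGetD hd.2 2 0 = M) := he
      simp [pvScore, he']
    · have he' : ¬ (PySem.List.pyGetD hd.2 1 0 - PySem.List.pyGetD hd.2 2 0 = M) := he
      simp [pvScore, he']
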